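-- pv_equiv track=rewrite | github.com/DocPapaya456/DSAA_CA1 | TextUtils/TextUtils.py | seperateLettersPunctuation
-- ===== SOURCE A (Python) =====
-- from typing import Tuple
--
-- def seperateLettersPunctuation(text: str) -> Tuple[str, str]:
--     """Separate alphabetic characters from punctuation, storing positions."""
--     letters = ""
--     punctuation = ""
--     i = 0
--     for char in text:
--         if char.isalpha():
--             letters += char
--             i += 1
--         else:
--             punctuation += str(i) if i > 0 else ""
--             punctuation += char
--             i = 0
--     return letters, punctuation
-- ===== SOURCE B (Python) =====
-- def seperateLettersPunctuation(text):
--     """Separate alphabetic characters from punctuation, storing positions.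
--
--     Run-based rewrite: walk maximal alpha / non-alpha runs with an index,
--     emitting the pending alpha-run length before each non-alpha run.
--     """
--     letters = []
--     punct = []
--     pending = 0
--     j, n = 0, len(text)
--     while j < n:
--         k = j
--         if text[j].isalpha():
--             while k < n and text[k].isalpha():
--                 k += 1
--             letters.append(text[j:k])
--             pending = k - j
--         else:
--             while k < n and not text[k].isalpha():
--                 k += 1
--             if pending > 0:
--                 punct.append(str(pending))
--             punct.append(text[j:k])
--             pending = 0
--         j = k
--     return "".join(letters), "".join(punct)
-- ===== Notes on version B (the rewrite author's own statement) =====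
-- stated objective: alternative
-- what changed: B walks maximal alpha/non-alpha runs with an index and slices, emitting the pending alpha-run length once before each non-alpha run and joining collected parts, instead of A's per-character loop with string concatenation and a running counter.
import Mathlib
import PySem

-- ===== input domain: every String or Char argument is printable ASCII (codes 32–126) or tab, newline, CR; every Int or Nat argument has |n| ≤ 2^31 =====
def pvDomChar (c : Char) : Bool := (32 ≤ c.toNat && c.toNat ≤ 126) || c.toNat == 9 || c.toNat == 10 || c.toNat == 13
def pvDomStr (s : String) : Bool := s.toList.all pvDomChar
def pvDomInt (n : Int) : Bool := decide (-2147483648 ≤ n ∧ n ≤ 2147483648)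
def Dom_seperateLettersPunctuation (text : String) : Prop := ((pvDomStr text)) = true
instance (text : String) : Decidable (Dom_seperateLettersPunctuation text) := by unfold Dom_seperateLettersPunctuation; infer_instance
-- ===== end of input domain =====

-- B walks maximal alpha/non-alpha runs instead of A's per-character loop with a running counter (objective: alternative decomposition).

-- ===== PORT A =====
-- per-character loop: state (letters, punctuation, i)
def pvAgo : List Char → List Char → List Char → Int → List Char × List Char
  | [], l, p, _ => (l, p)
  | c :: cs, l, p, i =>
    if PySem.Chars.isalpha c then pvAgo cs (l ++ [c]) p (i + 1)
    else pvAgo cs l (p ++ (if i > 0 then PySem.Int.toChars i else []) ++ [c]) 0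

def seperateLettersPunctuation (text : String) : String × String :=
  let r := pvAgo text.toList [] [] 0
  (String.mk r.1, String.mk r.2)

-- ===== PORT B =====
-- run-based loop: peel a maximal alpha or non-alpha run each step (the inner while loops
-- of Source B are takeWhile/dropWhile; parts are concatenated as Source B's join does)
def pvBgo : List Char → Int → List Char × List Char
  | [], _ => ([], [])
  | c :: cs, pending =>
    if h : PySem.Chars.isalpha c = true then
      let run := (c :: cs).takeWhile PySem.Chars.isalpha
      let rest := (c :: cs).dropWhile PySem.Chars.isalpha
      let r := pvBgo rest (run.length : Int)
      (run ++ r.1, r.2)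
    else
      let run := (c :: cs).takeWhile (fun x => !PySem.Chars.isalpha x)
      let rest := (c :: cs).dropWhile (fun x => !PySem.Chars.isalpha x)
      let r := pvBgo rest 0
      (r.1, (if pending > 0 then PySem.Int.toChars pending else []) ++ run ++ r.2)
  termination_by cs _ => cs.length
  decreasing_by
  · simp only [List.dropWhile_cons, h, if_true]
    exact Nat.lt_succ_of_le (List.length_dropWhile_le _ _)
  · simp only [List.dropWhile_cons, h, Bool.not_eq_true] at *
    simp only [Bool.not_false, if_true] at *
    exact Nat.lt_succ_of_le (List.length_dropWhile_le _ _)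

def seperateLettersPunctuation_alt (text : String) : String × String :=
  let r := pvBgo text.toList 0
  (String.mk r.1, String.mk r.2)

-- ===== PRECONDITION & SPEC =====
def Spec_seperateLettersPunctuation (text : String) (out : String × String) : Prop := out = seperateLettersPunctuation_alt text
instance (text : String) (out : String × String) : Decidable (Spec_seperateLettersPunctuation text out) := by unfold Spec_seperateLettersPunctuation; infer_instance

-- ===== CLAIM (what is proved, stated in full; the proofs are below) =====
def Claim_equal_seperateLettersPunctuation : Prop := ∀ (text : String), Dom_seperateLettersPunctuation text → Spec_seperateLettersPunctuation text (seperateLettersPunctuation text)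

-- ===== LEMMAS AND PROOFS =====

theorem pv_head_dropWhile {p : Char → Bool} : ∀ (l : List Char) (c : Char),
    (List.dropWhile p l).head? = some c → p c = false := by
  intro l
  induction l with
  | nil => intro c h; simp [List.dropWhile] at h
  | cons a t ih =>
    intro c h
    by_cases hp : p a = true
    · simp [List.dropWhile, hp] at h; exact ih c (by simpa [List.dropWhile] using h)
    · simp [List.dropWhile, hp] at h
      simp [← h]; simpa using hp

-- peel a whole alpha run in A's loop
theorem pvAgo_alpha_run : ∀ (run rest l p : List Char) (i : Int),
    (∀ c ∈ run, PySem.Chars.isalpha c = true) →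
    pvAgo (run ++ rest) l p i = pvAgo rest (l ++ run) p (i + run.length) := by
  intro run
  induction run with
  | nil => intro rest l p i _; simp
  | cons c t ih =>
    intro rest l p i hall
    have hc := hall c (by simp)
    simp only [List.cons_append, pvAgo, hc, if_true]
    rw [ih rest (l ++ [c]) p (i + 1) (fun x hx => hall x (by simp [hx]))]
    simp
    ring_nf

-- peel a whole non-alpha run in A's loop once i = 0
theorem pvAgo_nonalpha_run : ∀ (run rest l p : List Char),
    (∀ c ∈ run, PySem.Chars.isalpha c = false) →
    pvAgo (run ++ rest) l p 0 = pvAgo rest l (p ++ run) 0 := by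
  intro run
  induction run with
  | nil => intro rest l p _; simp
  | cons c t ih =>
    intro rest l p hall
    have hc := hall c (by simp)
    simp only [List.cons_append, pvAgo, hc, if_false, Bool.false_eq_true]
    have : ((0 : Int) > 0) = False := by simp
    rw [if_neg (by omega : ¬ (0 : Int) > 0)]
    rw [ih rest l (p ++ [] ++ [c]) (fun x hx => hall x (by simp [hx]))]
    simp

theorem pvAgo_eq_pvBgo : ∀ (n : Nat) (cs l p : List Char) (i : Int),
    cs.length ≤ n →
    (∀ c, cs.head? = some c → PySem.Chars.isalpha c = true → i = 0) →
    pvAgo cs l p i = (l ++ (pvBgo cs i).1, p ++ (pvBgo cs i).2) := by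
  intro n
  induction n with
  | zero =>
    intro cs l p i hn _
    have : cs = [] := List.eq_nil_of_length_eq_zero (Nat.le_zero.mp hn)
    subst this; simp [pvAgo, pvBgo]
  | succ n ih =>
    intro cs l p i hn hinv
    match cs with
    | [] => simp [pvAgo, pvBgo]
    | c :: cs' =>
      by_cases h : PySem.Chars.isalpha c = true
      · -- alpha run
        have hi0 : i = 0 := hinv c rfl h
        subst hi0
        set run := (c :: cs').takeWhile PySem.Chars.isalpha with hrun
        set rest := (c :: cs').dropWhile PySem.Chars.isalpha with hrest
        have hsplit : run ++ rest = c :: cs' := List.takeWhile_append_dropWhile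
        have hall : ∀ x ∈ run, PySem.Chars.isalpha x = true := by
          intro x hx; exact List.mem_takeWhile_imp hx
        have hlen : rest.length < (c :: cs').length := by
          rw [hrest]
          simp only [List.dropWhile_cons, h, if_true]
          exact Nat.lt_succ_of_le (List.length_dropWhile_le _ _)
        have h1 : pvAgo (c :: cs') l p 0 = pvAgo rest (l ++ run) p ((run.length : Int)) := by
          rw [← hsplit, pvAgo_alpha_run run rest l p 0 hall]; simp
        rw [h1, ih rest (l ++ run) p (run.length : Int)
              (by omega)
              (fun x hx hax => absurd hax (by simp [pv_head_dropWhile _ _ hx]))]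
        have hB : pvBgo (c :: cs') 0 =
            (run ++ (pvBgo rest (run.length : Int)).1, (pvBgo rest (run.length : Int)).2) := by
          rw [pvBgo, dif_pos h]
        rw [hB]; simp
      · -- non-alpha run
        have hc : PySem.Chars.isalpha c = false := by simpa using h
        set run' := cs'.takeWhile (fun x => !PySem.Chars.isalpha x) with hrun'
        set rest := cs'.dropWhile (fun x => !PySem.Chars.isalpha x) with hrest
        have hsplit : run' ++ rest = cs' := List.takeWhile_append_dropWhile
        have hall : ∀ x ∈ run', PySem.Chars.isalpha x = false := by
          intro x hx
          have := List.mem_takeWhile_imp hx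
          simpa using this
        have hlen : rest.length ≤ cs'.length := by
          rw [hrest]; exact List.length_dropWhile_le _ _
        have h1 : pvAgo (c :: cs') l p i =
            pvAgo cs' l (p ++ (if i > 0 then PySem.Int.toChars i else []) ++ [c]) 0 := by
          simp [pvAgo, hc]
        have h2 : pvAgo cs' l (p ++ (if i > 0 then PySem.Int.toChars i else []) ++ [c]) 0 =
            pvAgo rest l (p ++ (if i > 0 then PySem.Int.toChars i else []) ++ [c] ++ run') 0 := by
          rw [← hsplit, pvAgo_nonalpha_run run' rest l _ hall]
        rw [h1, h2, ih rest l _ 0 (by simp at hn; omega) (fun _ _ _ => rfl)]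
        have hB : pvBgo (c :: cs') i =
            ((pvBgo rest 0).1,
             (if i > 0 then PySem.Int.toChars i else []) ++ (c :: run') ++ (pvBgo rest 0).2) := by
          rw [pvBgo, dif_neg (by simp [hc])]
          rw [hrun', hrest]
          simp [hc]
        rw [hB]; simp

-- ===== VERDICT (by name: the statement is the Claim_ definition above) =====
theorem seperateLettersPunctuation_spec : Claim_equal_seperateLettersPunctuation := by
  intro text _
  unfold Spec_seperateLettersPunctuation seperateLettersPunctuation seperateLettersPunctuation_alt
  rw [pvAgo_eq_pvBgo text.toList.length text.toList [] [] 0 le_rfl (fun _ _ _ => rfl)]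
  simp
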